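-- pv_equiv track=rewrite | github.com/yevini118/programmers | level2/더_맵게.py | solution
-- ===== SOURCE A (Python) =====
-- from heapq import heappop,heappush,heapify
--
-- def solution(scoville, K):
--
--     heapify(scoville)
--     answer = 0
--
--     while len(scoville) > 1 and scoville[0] < K:
--
--         new_scoville = heappop(scoville) + heappop(scoville) * 2
--         heappush(scoville, new_scoville)
--
--         answer += 1
--
--     if scoville.pop() < K:
--         answer = -1
--
--     return answer
-- ===== SOURCE B (Python) =====
-- def solution(scoville, K):
--     # Return-value equivalent to A; note A heapifies/pops `scoville` in place,
--     # B works on a copy and leaves the argument untouched.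
--     pot = list(scoville)
--     answer = 0
--     while len(pot) > 1 and min(pot) < K:
--         a = min(pot)
--         pot.remove(a)
--         b = min(pot)
--         pot.remove(b)
--         pot.append(a + 2 * b)
--         answer += 1
--     if pot.pop() < K:
--         answer = -1
--     return answer
-- ===== Notes on version B (the rewrite author's own statement) =====
-- stated objective: alternative
-- what changed: Replaces the binary heap (heapify/heappop/heappush) with a plain list scanned linearly for its minimum each round (min/remove/append), a different data representation and per-step traversal; B also works on a copy instead of mutating the argument in place.
import Mathlib
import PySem

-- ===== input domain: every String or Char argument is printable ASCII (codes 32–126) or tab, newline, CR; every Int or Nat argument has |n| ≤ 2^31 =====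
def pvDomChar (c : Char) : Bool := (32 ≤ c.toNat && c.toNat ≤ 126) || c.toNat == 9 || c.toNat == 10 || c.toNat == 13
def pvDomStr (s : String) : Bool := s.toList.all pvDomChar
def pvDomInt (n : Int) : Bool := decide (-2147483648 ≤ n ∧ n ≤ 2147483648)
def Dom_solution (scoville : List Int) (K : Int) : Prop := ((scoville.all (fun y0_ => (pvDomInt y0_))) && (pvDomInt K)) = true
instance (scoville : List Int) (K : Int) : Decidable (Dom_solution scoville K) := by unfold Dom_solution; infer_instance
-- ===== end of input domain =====

-- B replaces A's binary heap with plain linear min-scans on a list (same return value;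
-- A mutates its `scoville` argument in place, B does not — the claim is about the return value).

-- ===== PORT A =====
-- A-side helpers: a literal port of CPython's heapq (_siftdown, _siftup, heapify, heappop,
-- heappush) specialised to Int.  All list indices heapq uses are nonnegative and in range,
-- so they are ported with Nat indices and `List.getD _ _ 0` / `List.set` (exact there).

theorem siftdownGo_dec (startpos pos : Nat) (h : startpos < pos) : (pos - 1) / 2 < pos :=
  Nat.lt_of_le_of_lt (Nat.div_le_self _ 2)
    (Nat.sub_lt (Nat.lt_of_le_of_lt (Nat.zero_le startpos) h) Nat.one_pos)

-- `_siftdown`'s while loop (bubble the hole at `pos` up towards `startpos`).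
def siftdownGo (heap : List Int) (startpos pos : Nat) (newitem : Int) : List Int :=
  if _h : startpos < pos then
    let parentpos := (pos - 1) / 2
    let parent := heap.getD parentpos 0
    if newitem < parent then
      siftdownGo (heap.set pos parent) startpos parentpos newitem
    else heap.set pos newitem
  else heap.set pos newitem
termination_by pos
decreasing_by exact siftdownGo_dec startpos pos _h

-- heapq._siftdown(heap, startpos, pos)
def siftdown (heap : List Int) (startpos pos : Nat) : List Int :=
  siftdownGo heap startpos pos (heap.getD pos 0)

theorem pvArith2 (n pos c : Nat) (h1 : pos < c) (h2 : c < n) : n - c < n - pos := by omega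

theorem siftupGo_dec (heap : List Int) (pos c : Nat) (x : Int) (h1 : pos < c)
    (h2 : c < heap.length) : (heap.set pos x).length - c < heap.length - pos := by
  rw [List.length_set]; exact pvArith2 _ _ _ h1 h2

-- the inner `childpos = childpos + 1 if …` choice of the smaller child, as a helper
def pickChild (heap : List Int) (childpos : Nat) : Nat :=
  if childpos + 1 < heap.length ∧ ¬ heap.getD childpos 0 < heap.getD (childpos + 1) 0 then
    childpos + 1
  else childpos

theorem pickChild_gt (heap : List Int) (c : Nat) : c ≤ pickChild heap c := by
  unfold pickChild; split
  · exact Nat.le_succ c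
  · exact Nat.le_refl c

theorem pickChild_lt (heap : List Int) (c : Nat) (h : c < heap.length) :
    pickChild heap c < heap.length := by
  unfold pickChild; split
  · exact And.left ‹_ ∧ _›
  · exact h

-- `_siftup`'s while loop: follow the smaller child down to a leaf, returns (heap, final pos).
def siftupGo (heap : List Int) (pos : Nat) : List Int × Nat :=
  if _h : 2 * pos + 1 < heap.length then
    siftupGo (heap.set pos (heap.getD (pickChild heap (2 * pos + 1)) 0))
      (pickChild heap (2 * pos + 1))
  else (heap, pos)
termination_by heap.length - pos
decreasing_by
  exact siftupGo_dec heap pos _ _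
    (Nat.lt_of_lt_of_le (by omega) (pickChild_gt heap (2 * pos + 1)))
    (pickChild_lt heap _ _h)

-- heapq._siftup(heap, pos): sift down to a leaf, restore newitem, then _siftdown back up.
def siftup (heap : List Int) (pos : Nat) : List Int :=
  let newitem := heap.getD pos 0
  let r := siftupGo heap pos
  siftdown (r.1.set r.2 newitem) pos r.2

-- heapq.heapify(x): for i in reversed(range(n//2)): _siftup(x, i)
def heapify (x : List Int) : List Int :=
  (List.range (x.length / 2)).reverse.foldl (fun h i => siftup h i) x

-- heapq.heappop(heap); returns (popped item, remaining heap).  `heap.pop()` on the empty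
-- list (IndexError) is excluded by Pre_solution / the loop guard, so getLastD/dropLast are exact.
def heappop (heap : List Int) : Int × List Int :=
  let lastelt := heap.getLastD 0
  let rest := heap.dropLast
  if rest.isEmpty then (lastelt, rest)
  else (rest.getD 0 0, siftup (rest.set 0 lastelt) 0)

-- heapq.heappush(heap, item): heap.append(item); _siftdown(heap, 0, len(heap)-1)
def heappush (heap : List Int) (item : Int) : List Int :=
  siftdown (heap ++ [item]) 0 heap.length

theorem length_siftdownGo (heap : List Int) (s p : Nat) (x : Int) :
    (siftdownGo heap s p x).length = heap.length := by
  fun_induction siftdownGo <;> simp_all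

theorem length_siftupGo (heap : List Int) (p : Nat) :
    (siftupGo heap p).1.length = heap.length := by
  fun_induction siftupGo <;> simp_all

theorem length_siftup (heap : List Int) (p : Nat) :
    (siftup heap p).length = heap.length := by
  simp [siftup, siftdown, length_siftdownGo, length_siftupGo]

theorem length_heappop (heap : List Int) :
    (heappop heap).2.length = heap.length - 1 := by
  unfold heappop
  by_cases h : heap.dropLast.isEmpty <;> simp [h, length_siftup]

theorem length_heappush (heap : List Int) (x : Int) :
    (heappush heap x).length = heap.length + 1 := by
  simp [heappush, siftdown, length_siftdownGo]

theorem length_removeD_le (xs : List Int) (v : Int) :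
    ((PySem.List.remove? xs v).getD []).length ≤ xs.length - 1 := by
  by_cases hv : v ∈ xs
  · rw [PySem.List.remove?_eq_some_erase _ _ hv]
    rw [Option.getD_some, List.length_erase]
    split
    · omega
    · exact absurd hv (by assumption)
  · rw [(PySem.List.remove?_eq_none_iff xs v).mpr hv]
    simp

theorem pvArith1 (a b c : Nat) (h1 : a ≤ b - 1) (h2 : b ≤ c - 1) (h3 : 1 < c) :
    a + 1 < c := by omega

theorem bloop_dec (pot : List Int) (a b v : Int) (hg : 1 < pot.length) :
    (((PySem.List.remove? ((PySem.List.remove? pot a).getD []) b).getD []) ++ [v]).length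
      < pot.length := by
  rw [List.length_append]
  exact pvArith1 _ _ _
    (length_removeD_le ((PySem.List.remove? pot a).getD []) b) (length_removeD_le pot a) hg

theorem pvArith3 (n : Nat) (h : 1 < n) : n - 1 - 1 + 1 < n := by omega

theorem aloop_dec (heap : List Int) (v : Int) (hg : 1 < heap.length) :
    (heappush (heappop (heappop heap).2).2 v).length < heap.length := by
  rw [length_heappush, length_heappop, length_heappop]
  exact pvArith3 _ hg

-- the while loop of A's solution; returns (final heap, answer)
def aloop (K : Int) (heap : List Int) (answer : Int) : List Int × Int :=
  if 1 < heap.length ∧ heap.getD 0 0 < K then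
    let p1 := heappop heap
    let p2 := heappop p1.2
    aloop K (heappush p2.2 (p1.1 + p2.1 * 2)) (answer + 1)
  else (heap, answer)
termination_by heap.length
decreasing_by exact aloop_dec heap _ (by exact ‹_ ∧ _›.1)

def solution (scoville : List Int) (K : Int) : Int :=
  let h := heapify scoville
  let r := aloop K h 0
  -- final `scoville.pop()`: IndexError on [] is excluded by Pre_solution; getLastD is exact here
  if r.1.getLastD 0 < K then -1 else r.2

-- ===== PORT B =====
-- B-side helper: the while loop of Source B (min / remove / append on a plain list).
-- `min(pot)` and `pot.remove(a)` are guarded (len > 1, a ∈ pot), so `.getD` defaults never fire.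
def bloop (K : Int) (pot : List Int) (answer : Int) : List Int × Int :=
  if 1 < pot.length ∧ (PySem.List.min? pot (fun x => x)).getD 0 < K then
    let a := (PySem.List.min? pot (fun x => x)).getD 0
    let pot1 := (PySem.List.remove? pot a).getD []
    let b := (PySem.List.min? pot1 (fun x => x)).getD 0
    let pot2 := (PySem.List.remove? pot1 b).getD []
    bloop K (pot2 ++ [a + 2 * b]) (answer + 1)
  else (pot, answer)
termination_by pot.length
decreasing_by exact bloop_dec pot _ _ _ (by exact ‹_ ∧ _›.1)

def solution_alt (scoville : List Int) (K : Int) : Int :=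
  let r := bloop K scoville 0
  -- final `pot.pop()`: IndexError on [] is excluded by Pre_solution
  if r.1.getLastD 0 < K then -1 else r.2

-- ===== PRECONDITION & SPEC =====
-- Pre_ excludes only the empty list, on which both Pythons raise IndexError at the final pop().
def Pre_solution (scoville : List Int) (K : Int) : Prop := scoville ≠ []
instance (scoville : List Int) (K : Int) : Decidable (Pre_solution scoville K) := by
  unfold Pre_solution; infer_instance

def pvWitness_solution : List Int × Int := ([1, 2, 3, 9, 10, 12], 7)

def Spec_solution (scoville : List Int) (K : Int) (out : Int) : Prop := out = solution_alt scoville K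
instance (scoville : List Int) (K : Int) (out : Int) : Decidable (Spec_solution scoville K out) := by
  unfold Spec_solution; infer_instance

-- ===== CLAIM (what is proved, stated in full; the proofs are below) =====
def Claim_equal_solution : Prop := ∀ (scoville : List Int) (K : Int), Dom_solution scoville K → Pre_solution scoville K → Spec_solution scoville K (solution scoville K)

-- ===== LEMMAS AND PROOFS =====
-- helper definitions for the proofs (array-encoded binary heaps)

def child (p c : Nat) : Prop := c = 2 * p + 1 ∨ c = 2 * p + 2

def IsHeap (l : List Int) : Prop :=
  ∀ p c, child p c → c < l.length → l.getD p 0 ≤ l.getD c 0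

-- subtree membership in the array encoding (j lies in the subtree rooted at r)
def inSub (r j : Nat) : Bool :=
  if j ≤ r then j == r else inSub r ((j - 1) / 2)
termination_by j
decreasing_by omega

theorem inSub_self (r : Nat) : inSub r r = true := by
  rw [inSub]; simp

theorem inSub_lt {r j : Nat} (h : j < r) : inSub r j = false := by
  rw [inSub]
  simp only [if_pos (Nat.le_of_lt h)]
  simpa using Nat.ne_of_lt h

theorem inSub_ge {r j : Nat} (h : inSub r j = true) : r ≤ j := by
  by_contra hc
  rw [inSub_lt (by omega)] at h
  simp at h

theorem inSub_parent {r j : Nat} (h : r < j) : inSub r j = inSub r ((j - 1) / 2) := by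
  conv_lhs => rw [inSub]
  simp [Nat.not_le.mpr h]

theorem inSub_zero (j : Nat) : inSub 0 j = true := by
  induction j using Nat.strong_induction_on with
  | _ j ih =>
    rcases Nat.eq_zero_or_pos j with h | h
    · subst h; exact inSub_self 0
    · rw [inSub_parent h]; exact ih _ (by omega)

theorem inSub_child {r p c : Nat} (h : inSub r p = true) (hc : child p c) : inSub r c = true := by
  have hrp := inSub_ge h
  have h2 : (c - 1) / 2 = p := by rcases hc with hc | hc <;> omega
  have h3 : r < c := by rcases hc with hc | hc <;> omega
  rw [inSub_parent h3, h2]; exact h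

theorem inSub_child_eq {r p c : Nat} (hc : child p c) :
    inSub r c = (c == r || inSub r p) := by
  rcases Nat.lt_trichotomy c r with h | h | h
  · rw [inSub_lt h]
    have hp : inSub r p = false := inSub_lt (by rcases hc with hc | hc <;> omega)
    simp [hp]
    omega
  · subst h; simp [inSub_self]
  · rw [inSub_parent h]
    have h2 : (c - 1) / 2 = p := by rcases hc with hc | hc <;> omega
    rw [h2]
    have : (c == r) = false := by simp; omega
    simp [this]

theorem inSub_trans (a b : Nat) : ∀ c, inSub a b = true → inSub b c = true → inSub a c = true := by
  intro c
  induction c using Nat.strong_induction_on with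
  | _ c ih =>
    intro h1 h2
    by_cases hcb : c = b
    · subst hcb; exact h1
    · have hbc : b < c := lt_of_le_of_ne (inSub_ge h2) (Ne.symm hcb)
      rw [inSub_parent hbc] at h2
      have hac : a < c := lt_of_le_of_lt (inSub_ge h1) hbc
      rw [inSub_parent hac]
      exact ih _ (by omega) h1 h2

-- getD / set / count basics
theorem getD_set_self (l : List Int) {i : Nat} (h : i < l.length) (a : Int) :
    (l.set i a).getD i 0 = a := by
  simp [List.getD_eq_getElem?_getD, h]

theorem getD_set_ne (l : List Int) {i j : Nat} (h : j ≠ i) (a : Int) :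
    (l.set i a).getD j 0 = l.getD j 0 := by
  simp [List.getD_eq_getElem?_getD, List.getElem?_set_ne (Ne.symm h)]

theorem set_getD_self (l : List Int) {i : Nat} (h : i < l.length) :
    l.set i (l.getD i 0) = l := by
  rw [List.getD_eq_getElem l 0 h, List.set_getElem_self]

theorem count_set (l : List Int) : ∀ (i : Nat), i < l.length → ∀ (a b : Int),
    (l.set i a).count b + (if l.getD i 0 = b then 1 else 0)
      = l.count b + (if a = b then 1 else 0) := by
  induction l with
  | nil => intro i h; simp at h
  | cons x t ihl =>
    intro i h a b
    cases i with
    | zero =>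
      simp only [List.set_cons_zero, List.count_cons, List.getD_cons_zero]
      split_ifs <;> simp_all <;> omega
    | succ n =>
      have := ihl n (by simpa using h) a b
      simp only [List.set_cons_succ, List.count_cons, List.getD_cons_succ]
      split_ifs at this ⊢ <;> simp_all <;> omega

theorem set_set_perm (l : List Int) {i j : Nat} (hi : i < l.length) (hj : j < l.length)
    (hij : i ≠ j) (x : Int) :
    ((l.set i (l.getD j 0)).set j x).Perm (l.set i x) := by
  rw [List.perm_iff_count]
  intro b
  have c1 := count_set (l.set i (l.getD j 0)) j (by simpa using hj) x b
  have c2 := count_set l i hi (l.getD j 0) b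
  have c3 := count_set l i hi x b
  rw [getD_set_ne l (Ne.symm hij)] at c1
  split_ifs at c1 c2 c3 <;> omega

-- _siftdown (bubble-up) correctness
theorem siftdownGo_spec (s : Nat) (x : Int) : ∀ (pos : Nat) (l : List Int),
    inSub s pos = true → pos < l.length →
    (∀ p c, child p c → c < l.length → s ≤ p → p ≠ pos → c ≠ pos → l.getD p 0 ≤ l.getD c 0) →
    (∀ c, child pos c → c < l.length → x ≤ l.getD c 0) →
    (s < pos → ∀ c, child pos c → c < l.length → l.getD ((pos - 1) / 2) 0 ≤ l.getD c 0) →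
    (siftdownGo l s pos x).Perm (l.set pos x) ∧
    (∀ p c, child p c → c < l.length → s ≤ p →
      (siftdownGo l s pos x).getD p 0 ≤ (siftdownGo l s pos x).getD c 0) := by
  intro pos
  induction pos using Nat.strong_induction_on with
  | _ pos ih =>
    intro l hsub hlen H1 H2 H2b
    rw [siftdownGo]
    by_cases hsp : s < pos
    · simp only [dif_pos hsp]
      by_cases hmv : x < l.getD ((pos - 1) / 2) 0
      · simp only [if_pos hmv]
        -- recursive case: move parent down into pos, continue at parentpos
        have hpp : (pos - 1) / 2 < pos := by omega
        have hppl : (pos - 1) / 2 < l.length := by omega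
        have hsub' : inSub s ((pos - 1) / 2) = true := by
          rw [← inSub_parent hsp]; exact hsub
        have hchild : child ((pos - 1) / 2) pos := by unfold child; omega
        have hne : pos ≠ (pos - 1) / 2 := by omega
        set l1 := l.set pos (l.getD ((pos - 1) / 2) 0) with hl1
        have hlen1 : l1.length = l.length := by simp [hl1]
        have g1 : l1.getD pos 0 = l.getD ((pos - 1) / 2) 0 := getD_set_self l hlen _
        have gne : ∀ j, j ≠ pos → l1.getD j 0 = l.getD j 0 := fun j hj => getD_set_ne l hj _
        have main := ih ((pos - 1) / 2) hpp l1 hsub' (by omega)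
          (by -- H1'
            intro p c hc hcl hsp' hppne hcne
            rw [hlen1] at hcl
            by_cases hp : p = pos
            · subst hp
              rw [g1, gne c (by rcases hc with hc | hc <;> omega)]
              exact H2b hsp c hc hcl
            · have hcp : c ≠ pos := by
                intro hh; subst hh
                exact hppne (by rcases hc with hc | hc <;> omega)
              rw [gne p hp, gne c hcp]
              exact H1 p c hc hcl hsp' hp hcp)
          (by -- H2'
            intro c hc hcl
            rw [hlen1] at hcl
            by_cases hcp : c = pos
            · subst hcp; rw [g1]; exact le_of_lt hmv
            · rw [gne c hcp]
              refine le_trans (le_of_lt hmv) (H1 _ c hc hcl (inSub_ge hsub') (by omega) hcp))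
          (by -- H2b'
            intro hspp c hc hcl
            rw [hlen1] at hcl
            have hppp : ((pos - 1) / 2 - 1) / 2 ≠ pos := by omega
            have hsubpp : inSub s (((pos - 1) / 2 - 1) / 2) = true := by
              rw [← inSub_parent hspp]; exact hsub'
            have hchild2 : child (((pos - 1) / 2 - 1) / 2) ((pos - 1) / 2) := by unfold child; omega
            have e1 : l.getD (((pos - 1) / 2 - 1) / 2) 0 ≤ l.getD ((pos - 1) / 2) 0 :=
              H1 _ _ hchild2 hppl (inSub_ge hsubpp) hppp (by omega)
            rw [gne _ hppp]
            by_cases hcp : c = pos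
            · subst hcp; rw [g1]; exact e1
            · rw [gne c hcp]
              exact le_trans e1 (H1 _ c hc hcl (inSub_ge hsub') (by omega) hcp))
        refine ⟨?_, ?_⟩
        · exact main.1.trans (set_set_perm l hlen hppl (by omega) x)
        · intro p c hc hcl hsp'
          exact main.2 p c hc (by rwa [hlen1]) hsp'
      · -- stop: parent ≤ x; place x at pos
        simp only [if_neg hmv]
        refine ⟨List.Perm.refl _, ?_⟩
        intro p c hc hcl hsp'
        by_cases hcp : c = pos
        · subst hcp
          have hp : p = (c - 1) / 2 := by rcases hc with hc | hc <;> omega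
          have hpc : p ≠ c := by rcases hc with hc | hc <;> omega
          rw [getD_set_self l hlen, getD_set_ne l hpc, hp]
          omega
        · by_cases hpp : p = pos
          · subst hpp
            rw [getD_set_self l hlen, getD_set_ne l hcp]
            exact H2 c hc hcl
          · rw [getD_set_ne l hpp, getD_set_ne l hcp]
            exact H1 p c hc hcl hsp' hpp hcp
    · -- pos = s
      have hps : pos = s := le_antisymm (by omega) (inSub_ge hsub)
      simp only [dif_neg hsp]
      refine ⟨List.Perm.refl _, ?_⟩
      intro p c hc hcl hsp'
      by_cases hcp : c = pos
      · exfalso; subst hcp; rcases hc with hc | hc <;> omega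
      · by_cases hpp : p = pos
        · subst hpp
          rw [getD_set_self l hlen, getD_set_ne l hcp]
          exact H2 c hc hcl
        · rw [getD_set_ne l hpp, getD_set_ne l hcp]
          exact H1 p c hc hcl hsp' hpp hcp
-- _siftup's while loop: correctness of sifting the hole down along smaller children
theorem siftupGo_spec (l : List Int) (pos : Nat) :
    pos < l.length →
    (∀ p c, child p c → c < l.length → pos < p → l.getD p 0 ≤ l.getD c 0) →
    pos ≤ (siftupGo l pos).2 ∧ (siftupGo l pos).2 < l.length ∧
    l.length ≤ 2 * (siftupGo l pos).2 + 1 ∧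
    inSub pos (siftupGo l pos).2 = true ∧
    (∀ x, ((siftupGo l pos).1.set (siftupGo l pos).2 x).Perm (l.set pos x)) ∧
    (∀ j, inSub pos j = false → (siftupGo l pos).1.getD j 0 = l.getD j 0) ∧
    (∀ p c, child p c → c < l.length → pos ≤ p →
      (siftupGo l pos).1.getD p 0 ≤ (siftupGo l pos).1.getD c 0) ∧
    ((siftupGo l pos).1.getD pos 0 = l.getD pos 0 ∨
      ∃ c, child pos c ∧ c < l.length ∧ (siftupGo l pos).1.getD pos 0 = l.getD c 0) := by
  fun_induction siftupGo l pos with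
  | case1 heap pos h ih =>
    intro hlen H
    set c := pickChild heap (2 * pos + 1) with hc
    obtain ⟨hchild, hclen, hmin⟩ : child pos c ∧ c < heap.length ∧
        (∀ sib, child pos sib → sib < heap.length → sib ≠ c →
          heap.getD c 0 ≤ heap.getD sib 0) := by
      rw [hc]
      unfold pickChild
      split
      · rename_i hcond
        refine ⟨by unfold child; omega, hcond.1, ?_⟩
        intro sib hs hsl hsne
        have hsib : sib = 2 * pos + 1 := by unfold child at hs; omega
        subst hsib
        have := hcond.2
        omega
      · rename_i hcond
        refine ⟨Or.inl rfl, h, ?_⟩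
        intro sib hs hsl hsne
        have hsib : sib = 2 * pos + 1 + 1 := by unfold child at hs; omega
        subst hsib
        rcases not_and_or.mp hcond with h1 | h1
        · omega
        · push_neg at h1
          exact le_of_lt h1
    have hposc : pos < c := by rcases hchild with h1 | h1 <;> omega
    have g1 : (heap.set pos (heap.getD c 0)).getD pos 0 = heap.getD c 0 :=
      getD_set_self heap hlen _
    have gne : ∀ j, j ≠ pos →
        (heap.set pos (heap.getD c 0)).getD j 0 = heap.getD j 0 :=
      fun j hj => getD_set_ne heap hj _
    have hlen1 : (heap.set pos (heap.getD c 0)).length = heap.length := by simp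
    have main := ih (by rwa [hlen1])
      (by
        intro p cc hcc hccl hcp
        rw [hlen1] at hccl
        have hp : p ≠ pos := by omega
        have hccp : cc ≠ pos := by rcases hcc with h1 | h1 <;> omega
        rw [gne p hp, gne cc hccp]
        exact H p cc hcc hccl (by omega))
    obtain ⟨m1, m2, m3, m4, m5, m6, m7, m8⟩ := main
    rw [hlen1] at m2 m3 m7
    have huntouch : ∀ j, inSub pos j = false →
        (siftupGo (heap.set pos (heap.getD c 0)) c).1.getD j 0 = heap.getD j 0 := by
      intro j hj
      have hcj : inSub c j = false := by
        by_contra hh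
        rw [Bool.not_eq_false] at hh
        rw [inSub_trans pos c j (inSub_child (inSub_self pos) hchild) hh] at hj
        simp at hj
      have hjp : j ≠ pos := by
        intro hh; subst hh; rw [inSub_self] at hj; simp at hj
      rw [m6 j hcj, gne j hjp]
    have hrpos : (siftupGo (heap.set pos (heap.getD c 0)) c).1.getD pos 0 = heap.getD c 0 := by
      rw [m6 pos (inSub_lt hposc), g1]
    refine ⟨by omega, m2, m3, ?_, ?_, huntouch, ?_, ?_⟩
    · exact inSub_trans pos c _ (inSub_child (inSub_self pos) hchild) m4
    · intro x
      exact (m5 x).trans (set_set_perm heap hlen hclen (by omega) x)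
    · -- all edges with parent ≥ pos are good in the result
      intro p cc hcc hccl hpp
      by_cases hcle : c ≤ p
      · exact m7 p cc hcc hccl hcle
      · by_cases hp : p = pos
        · rw [hp] at hcc ⊢
          by_cases hceq : cc = c
          · subst hceq
            rw [hrpos]
            rcases m8 with hm | ⟨c2, hc2, hc2l, hm⟩
            · rw [hm, gne c (by omega)]
            · rw [hlen1] at hc2l
              have hc2p : c2 ≠ pos := by rcases hc2 with h1 | h1 <;> omega
              rw [hm, gne c2 hc2p]
              exact H c c2 hc2 hc2l hposc
          · -- cc is the sibling of the chosen child
            have hsubcc : inSub c cc = false := by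
              rw [inSub_child_eq hcc, inSub_lt hposc]
              have h1 : (cc == c) = false := by simp [hceq]
              simp [h1]
            rw [hrpos, m6 cc hsubcc, gne cc (by unfold child at hcc; omega)]
            exact hmin cc hcc hccl hceq
        · -- pos < p < c : both endpoints untouched
          have hsubp : inSub c p = false := inSub_lt (by omega)
          have hsubcc : inSub c cc = false := by
            rw [inSub_child_eq hcc, hsubp]
            have : (cc == c) = false := by
              simp
              intro hh
              exact hp (by rcases hcc with h1 | h1 <;> rcases hchild with h2 | h2 <;> omega)
            simp [this]
          have hccp2 : cc ≠ pos := by rcases hcc with h1 | h1 <;> omega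
          rw [m6 p hsubp, m6 cc hsubcc, gne p hp, gne cc hccp2]
          exact H p cc hcc hccl (by omega)
    · exact Or.inr ⟨c, hchild, hclen, hrpos⟩
  | case2 heap pos h =>
    intro hlen H
    refine ⟨le_refl _, hlen, by omega, inSub_self pos, fun x => List.Perm.refl _,
      fun j _ => rfl, ?_, Or.inl rfl⟩
    intro p cc hcc hccl hpp
    by_cases hp : p = pos
    · exfalso; subst hp; rcases hcc with h1 | h1 <;> omega
    · exact H p cc hcc hccl (by omega)

-- getD over append (left part)
theorem getD_append_left (l t : List Int) {i : Nat} (h : i < l.length) :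
    (l ++ t).getD i 0 = l.getD i 0 := by
  simp [List.getD_eq_getElem?_getD, List.getElem?_append_left h]

-- heapq._siftup restores the heap on the subtree rooted at pos
theorem siftup_spec (l : List Int) (pos : Nat) (hlen : pos < l.length)
    (H : ∀ p c, child p c → c < l.length → pos < p → l.getD p 0 ≤ l.getD c 0) :
    (siftup l pos).Perm l ∧
    (∀ p c, child p c → c < l.length → pos ≤ p →
      (siftup l pos).getD p 0 ≤ (siftup l pos).getD c 0) := by
  obtain ⟨m1, m2, m3, m4, m5, m6, m7, m8⟩ := siftupGo_spec l pos hlen H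
  have hlenr : (siftupGo l pos).1.length = l.length := length_siftupGo l pos
  have hlen2 : ((siftupGo l pos).1.set (siftupGo l pos).2 (l.getD pos 0)).length = l.length := by
    simp [hlenr]
  have hni : ((siftupGo l pos).1.set (siftupGo l pos).2 (l.getD pos 0)).getD (siftupGo l pos).2 0
      = l.getD pos 0 := getD_set_self _ (by omega) _
  have sd := siftdownGo_spec pos (l.getD pos 0) (siftupGo l pos).2
    ((siftupGo l pos).1.set (siftupGo l pos).2 (l.getD pos 0)) m4 (by omega)
    (by
      intro p c hc hcl hsp hpne hcne
      rw [hlen2] at hcl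
      rw [getD_set_ne _ hpne, getD_set_ne _ hcne]
      exact m7 p c hc hcl hsp)
    (by intro c hc hcl; rw [hlen2] at hcl; exfalso; unfold child at hc; omega)
    (by intro _ c hc hcl; rw [hlen2] at hcl; exfalso; unfold child at hc; omega)
  have hgoal : siftup l pos
      = siftdownGo ((siftupGo l pos).1.set (siftupGo l pos).2 (l.getD pos 0)) pos
          (siftupGo l pos).2 (l.getD pos 0) := by
    show siftdownGo ((siftupGo l pos).1.set (siftupGo l pos).2 (l.getD pos 0)) pos
        (siftupGo l pos).2
        (((siftupGo l pos).1.set (siftupGo l pos).2 (l.getD pos 0)).getD (siftupGo l pos).2 0) = _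
    rw [hni]
  constructor
  · rw [hgoal]
    refine sd.1.trans ?_
    rw [List.set_set]
    exact (m5 _).trans (by rw [set_getD_self l hlen])
  · intro p c hc hcl hp
    rw [hgoal]
    exact sd.2 p c hc (by rwa [hlen2]) hp

-- the heapify loop: after processing i = m-1 … 0, every edge is good
theorem heapify_go : ∀ (m : Nat) (l : List Int), 2 * m ≤ l.length →
    (∀ p c, child p c → c < l.length → m ≤ p → l.getD p 0 ≤ l.getD c 0) →
    ((List.range m).reverse.foldl (fun h i => siftup h i) l).Perm l ∧
    IsHeap ((List.range m).reverse.foldl (fun h i => siftup h i) l) := by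
  intro m
  induction m with
  | zero =>
    intro l _ hinv
    exact ⟨List.Perm.refl l, fun p c hc hcl => hinv p c hc hcl (Nat.zero_le p)⟩
  | succ m ihm =>
    intro l hm hinv
    rw [List.range_succ, List.reverse_append, List.reverse_singleton, List.singleton_append,
      List.foldl_cons]
    have hs := siftup_spec l m (by omega) (fun p c hc hcl hp => hinv p c hc hcl (by omega))
    have hlen1 : (siftup l m).length = l.length := length_siftup l m
    have := ihm (siftup l m) (by omega)
      (fun p c hc hcl hp => hs.2 p c hc (by rw [hlen1] at hcl; exact hcl) (by omega))
    exact ⟨this.1.trans hs.1, this.2⟩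

theorem heapify_spec (x : List Int) : (heapify x).Perm x ∧ IsHeap (heapify x) := by
  unfold heapify
  exact heapify_go (x.length / 2) x (by omega)
    (fun p c hc hcl hp => by exfalso; unfold child at hc; omega)

theorem root_le (l : List Int) (hh : IsHeap l) : ∀ j, j < l.length → l.getD 0 0 ≤ l.getD j 0 := by
  intro j
  induction j using Nat.strong_induction_on with
  | _ j ih =>
    intro hj
    rcases Nat.eq_zero_or_pos j with h | h
    · subst h; exact le_refl _
    · exact le_trans (ih ((j - 1) / 2) (by omega) (by omega))
        (hh _ j (by unfold child; omega) hj)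

theorem heappop_spec (l : List Int) (hne : l ≠ []) (hh : IsHeap l) :
    (heappop l).1 = l.getD 0 0 ∧ (heappop l).2.Perm l.tail ∧ IsHeap (heappop l).2 := by
  have hlpos : 0 < l.length := List.length_pos_of_ne_nil hne
  unfold heappop
  by_cases h1 : l.dropLast.isEmpty
  · -- single-element heap: pop() empties it
    obtain ⟨a, ha⟩ : ∃ a, l = [a] := by
      have hld := List.isEmpty_iff.mp h1
      have h2 : l.dropLast.length = 0 := by rw [hld]; rfl
      rw [List.length_dropLast] at h2
      exact List.length_eq_one_iff.mp (by omega)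
    subst ha
    refine ⟨rfl, by simp, ?_⟩
    intro p c hc hcl
    simp at hcl
  · have hld : l.dropLast ≠ [] := by simpa [List.isEmpty_iff] using h1
    have hl2 : 2 ≤ l.length := by
      have h2 : l.dropLast.length = l.length - 1 := List.length_dropLast
      have := List.length_pos_of_ne_nil hld
      omega
    rw [if_neg h1]
    have hrl : l.dropLast.length = l.length - 1 := List.length_dropLast
    have hgd : ∀ j, j < l.dropLast.length → l.dropLast.getD j 0 = l.getD j 0 := by
      intro j hj
      rw [List.getD_eq_getElem _ 0 hj, List.getD_eq_getElem l 0 (by omega)]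
      exact List.getElem_dropLast hj
    have hg0 : l.dropLast.getD 0 0 = l.getD 0 0 := hgd 0 (by omega)
    have hlen2 : (l.dropLast.set 0 (l.getLastD 0)).length = l.length - 1 := by simp [hrl]
    have hsp := siftup_spec (l.dropLast.set 0 (l.getLastD 0)) 0 (by omega) (by
      intro p c hc hcl hp
      have hcne : c ≠ 0 := by unfold child at hc; omega
      have hpne : p ≠ 0 := by omega
      rw [getD_set_ne _ hpne, getD_set_ne _ hcne]
      rw [hlen2] at hcl
      have hpl : p < l.dropLast.length := by unfold child at hc; omega
      rw [hgd p hpl, hgd c (by omega)]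
      exact hh p c hc (by omega))
    refine ⟨hg0, ?_, ?_⟩
    · refine hsp.1.trans ?_
      have hl2eq : l.dropLast.set 0 (l.getLastD 0) = l.getLastD 0 :: l.dropLast.tail := by
        cases hcc : l.dropLast with
        | nil => exact absurd hcc hld
        | cons r0 rt => rfl
      have hlast' : l.getLast hne = l.getLastD 0 := by
        rw [List.getLastD_eq_getLast?, List.getLast?_eq_getLast hne]
        rfl
      have hltail : l.tail = l.dropLast.tail ++ [l.getLastD 0] := by
        conv_lhs => rw [← List.dropLast_append_getLast hne]
        rw [hlast']
        cases hcc : l.dropLast with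
        | nil => exact absurd hcc hld
        | cons r0 rt => rfl
      rw [hl2eq, hltail]
      exact (List.perm_append_singleton _ _).symm
    · intro p c hc hcl
      have hls : (siftup (l.dropLast.set 0 (l.getLastD 0)) 0).length = l.length - 1 := by
        rw [length_siftup, hlen2]
      rw [hls] at hcl
      exact hsp.2 p c hc (by omega) (Nat.zero_le p)

theorem heappush_spec (l : List Int) (x : Int) (hh : IsHeap l) :
    (heappush l x).Perm (l ++ [x]) ∧ IsHeap (heappush l x) := by
  have hg : (l ++ [x]).getD l.length 0 = x := by
    simp [List.getD_eq_getElem?_getD]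
  have sd := siftdownGo_spec 0 x l.length (l ++ [x]) (inSub_zero _) (by simp)
    (by
      intro p c hc hcl h0 hpne hcne
      have hcl' : c < l.length := by simp at hcl; omega
      have hpl : p < l.length := by unfold child at hc; omega
      rw [getD_append_left l [x] hpl, getD_append_left l [x] hcl']
      exact hh p c hc hcl')
    (by intro c hc hcl; exfalso; simp at hcl; unfold child at hc; omega)
    (by intro _ c hc hcl; exfalso; simp at hcl; unfold child at hc; omega)
  have hgoal : heappush l x = siftdownGo (l ++ [x]) 0 l.length x := by
    unfold heappush siftdown
    rw [hg]
  have hset : (l ++ [x]).set l.length x = l ++ [x] := by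
    clear hg sd
    induction l with
    | nil => rfl
    | cons a t ih => simpa using ih
  constructor
  · rw [hgoal]; exact sd.1.trans (by rw [hset])
  · intro p c hc hcl
    rw [hgoal] at hcl ⊢
    rw [length_siftdownGo] at hcl
    exact sd.2 p c hc hcl (Nat.zero_le p)

-- min(pot): membership and minimality
theorem min_spec (p : List Int) (hne : p ≠ []) :
    (PySem.List.min? p (fun x => x)).getD 0 ∈ p ∧
    ∀ y ∈ p, (PySem.List.min? p (fun x => x)).getD 0 ≤ y := by
  obtain ⟨m, hm⟩ : ∃ m, PySem.List.min? p (fun x => x) = some m := by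
    cases hmm : PySem.List.min? p (fun x => x) with
    | none => exact absurd ((PySem.List.min?_eq_none_iff p (fun x => x)).mp hmm) hne
    | some m => exact ⟨m, rfl⟩
  rw [hm]
  exact ⟨PySem.List.min?_mem hm, fun y hy => PySem.List.min?_isMin hm y hy⟩

theorem root_eq_min (h p : List Int) (hperm : h.Perm p) (hh : IsHeap h) (hne : h ≠ []) :
    (PySem.List.min? p (fun x => x)).getD 0 = h.getD 0 0 := by
  have hpne : p ≠ [] := by
    intro he
    subst he
    exact hne hperm.eq_nil
  obtain ⟨hmem, hmin⟩ := min_spec p hpne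
  have h0mem : h.getD 0 0 ∈ h := by
    rw [List.getD_eq_getElem h 0 (List.length_pos_of_ne_nil hne)]
    exact List.getElem_mem _
  apply le_antisymm
  · exact hmin _ (hperm.subset h0mem)
  · obtain ⟨j, hj, hje⟩ := List.mem_iff_getElem.mp (hperm.symm.subset hmem)
    rw [← hje, ← List.getD_eq_getElem h 0 hj]
    exact root_le h hh j hj

-- one extraction step: heappop on the heap matches min+remove on the plain list
theorem pop_step (h p : List Int) (hperm : h.Perm p) (hne : h ≠ []) (hh : IsHeap h) :
    (heappop h).1 = (PySem.List.min? p (fun x => x)).getD 0 ∧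
    (heappop h).2.Perm
      ((PySem.List.remove? p ((PySem.List.min? p (fun x => x)).getD 0)).getD []) ∧
    IsHeap (heappop h).2 ∧ (heappop h).2.length = h.length - 1 := by
  obtain ⟨e1, e2, e3⟩ := heappop_spec h hne hh
  have hmin := root_eq_min h p hperm hh hne
  have hpne : p ≠ [] := by intro he; subst he; exact hne hperm.eq_nil
  have hmem : (PySem.List.min? p (fun x => x)).getD 0 ∈ p := (min_spec p hpne).1
  refine ⟨by rw [e1, hmin], ?_, e3, length_heappop h⟩
  rw [PySem.List.remove?_eq_some_erase _ _ hmem, Option.getD_some, hmin]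
  cases h with
  | nil => exact absurd rfl hne
  | cons h0 t =>
    have hroot : (h0 :: t).getD 0 0 = h0 := rfl
    rw [hroot]
    refine e2.trans ?_
    have ht : ((h0 :: t).tail : List Int) = (h0 :: t).erase h0 := by simp
    rw [ht]
    exact hperm.erase h0

-- the two while loops run in lockstep: equal answers, permuted pots, heap & guard facts
theorem loop_eq (K : Int) : ∀ (n : Nat) (h p : List Int) (ans : Int), h.length = n → h ≠ [] →
    h.Perm p → IsHeap h →
    (aloop K h ans).2 = (bloop K p ans).2 ∧ (aloop K h ans).1.Perm (bloop K p ans).1 ∧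
    (aloop K h ans).1 ≠ [] ∧ IsHeap (aloop K h ans).1 ∧
    ¬(1 < (aloop K h ans).1.length ∧ (aloop K h ans).1.getD 0 0 < K) := by
  intro n
  induction n using Nat.strong_induction_on with
  | _ n ih =>
    intro h p ans hn hne hperm hh
    have hpl := hperm.length_eq
    have hmin := root_eq_min h p hperm hh hne
    by_cases hg : 1 < h.length ∧ h.getD 0 0 < K
    · have ha : aloop K h ans
          = aloop K (heappush (heappop (heappop h).2).2
              ((heappop h).1 + (heappop (heappop h).2).1 * 2)) (ans + 1) := by
        rw [aloop, if_pos hg]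
      have hb : bloop K p ans
          = bloop K
              (((PySem.List.remove?
                  ((PySem.List.remove? p ((PySem.List.min? p (fun x => x)).getD 0)).getD [])
                  ((PySem.List.min?
                      ((PySem.List.remove? p ((PySem.List.min? p (fun x => x)).getD 0)).getD [])
                      (fun x => x)).getD 0)).getD [])
                ++ [((PySem.List.min? p (fun x => x)).getD 0)
                    + 2 * ((PySem.List.min?
                        ((PySem.List.remove? p ((PySem.List.min? p (fun x => x)).getD 0)).getD [])
                        (fun x => x)).getD 0)]) (ans + 1) := by
        rw [bloop, if_pos ⟨by omega, by rw [hmin]; exact hg.2⟩]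
      obtain ⟨a1, a2, a3, a4⟩ := pop_step h p hperm hne hh
      have hne1 : (heappop h).2 ≠ [] := by
        refine List.ne_nil_of_length_pos ?_
        rw [a4]; omega
      obtain ⟨b1, b2, b3, b4⟩ := pop_step (heappop h).2 _ a2 hne1 a3
      obtain ⟨p1, p2⟩ := heappush_spec (heappop (heappop h).2).2
        ((heappop h).1 + (heappop (heappop h).2).1 * 2) b3
      have hv : (heappop h).1 + (heappop (heappop h).2).1 * 2
          = ((PySem.List.min? p (fun x => x)).getD 0)
            + 2 * ((PySem.List.min?
                ((PySem.List.remove? p ((PySem.List.min? p (fun x => x)).getD 0)).getD [])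
                (fun x => x)).getD 0) := by
        rw [a1, b1]; ring
      have hlen' : (heappush (heappop (heappop h).2).2
          ((heappop h).1 + (heappop (heappop h).2).1 * 2)).length = h.length - 1 := by
        rw [length_heappush, b4, a4]
        omega
      have hne' : (heappush (heappop (heappop h).2).2
          ((heappop h).1 + (heappop (heappop h).2).1 * 2)) ≠ [] := by
        refine List.ne_nil_of_length_pos ?_
        rw [hlen']; omega
      have hperm' : (heappush (heappop (heappop h).2).2
          ((heappop h).1 + (heappop (heappop h).2).1 * 2)).Perm
          (((PySem.List.remove?
              ((PySem.List.remove? p ((PySem.List.min? p (fun x => x)).getD 0)).getD [])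
              ((PySem.List.min?
                  ((PySem.List.remove? p ((PySem.List.min? p (fun x => x)).getD 0)).getD [])
                  (fun x => x)).getD 0)).getD [])
            ++ [((PySem.List.min? p (fun x => x)).getD 0)
                + 2 * ((PySem.List.min?
                    ((PySem.List.remove? p ((PySem.List.min? p (fun x => x)).getD 0)).getD [])
                    (fun x => x)).getD 0)]) := by
        refine p1.trans ?_
        rw [← hv]
        exact b2.append (List.Perm.refl _)
      rw [ha, hb]
      exact ih (h.length - 1) (by omega) _ _ (ans + 1) hlen' hne' hperm' p2
    · have ha : aloop K h ans = (h, ans) := by rw [aloop, if_neg hg]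
      have hb : bloop K p ans = (p, ans) := by
        rw [bloop, if_neg ?_]
        intro hc
        exact hg ⟨by omega, by rw [← hmin]; exact hc.2⟩
      rw [ha, hb]
      exact ⟨rfl, hperm, hne, hh, hg⟩

theorem getLastD_mem (l : List Int) (hl : l ≠ []) : l.getLastD 0 ∈ l := by
  rw [List.getLastD_eq_getLast?, List.getLast?_eq_getLast hl, Option.getD_some]
  exact List.getLast_mem hl

-- ===== VERDICT (by name: the statement is the Claim_ definition above) =====
theorem solution_spec : Claim_equal_solution := by
  unfold Claim_equal_solution
  intro scoville K _ hpre
  unfold Spec_solution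
  have hpre' : scoville ≠ [] := hpre
  obtain ⟨hperm, hheap⟩ := heapify_spec scoville
  have hne : heapify scoville ≠ [] := by
    intro he
    have h2 := hperm.symm
    rw [he] at h2
    exact hpre' h2.eq_nil
  obtain ⟨ea, ep, ene, eh, eg⟩ :=
    loop_eq K (heapify scoville).length (heapify scoville) scoville 0 rfl hne hperm hheap
  have hlr := ep.length_eq
  show (if (aloop K (heapify scoville) 0).1.getLastD 0 < K then -1
          else (aloop K (heapify scoville) 0).2)
      = (if (bloop K scoville 0).1.getLastD 0 < K then -1 else (bloop K scoville 0).2)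
  have hApos : 0 < (aloop K (heapify scoville) 0).1.length := List.length_pos_of_ne_nil ene
  have hiff : ((aloop K (heapify scoville) 0).1.getLastD 0 < K)
      ↔ ((bloop K scoville 0).1.getLastD 0 < K) := by
    by_cases hgt : 1 < (aloop K (heapify scoville) 0).1.length
    · -- the loop stopped because every element is already ≥ K, on both sides
      have hK : K ≤ (aloop K (heapify scoville) 0).1.getD 0 0 := by
        by_contra hc
        push_neg at hc
        exact eg ⟨hgt, hc⟩
      have hall : ∀ y ∈ (aloop K (heapify scoville) 0).1, K ≤ y := by
        intro y hy
        obtain ⟨j, hj, hje⟩ := List.mem_iff_getElem.mp hy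
        refine le_trans hK ?_
        rw [← hje, ← List.getD_eq_getElem _ 0 hj]
        exact root_le _ eh j hj
      have hBne : (bloop K scoville 0).1 ≠ [] := by
        refine List.ne_nil_of_length_pos ?_
        omega
      have hA : K ≤ (aloop K (heapify scoville) 0).1.getLastD 0 :=
        hall _ (getLastD_mem _ ene)
      have hB : K ≤ (bloop K scoville 0).1.getLastD 0 :=
        hall _ (ep.symm.subset (getLastD_mem _ hBne))
      constructor <;> intro hcc <;> omega
    · -- a single element is left; the permutation makes both sides identical
      have h1 : (aloop K (heapify scoville) 0).1.length = 1 := by omega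
      obtain ⟨v, hv⟩ := List.length_eq_one_iff.mp h1
      have hB : (bloop K scoville 0).1 = [v] := by
        have h2 := ep.symm
        rw [hv] at h2
        exact List.perm_singleton.mp h2
      rw [hv, hB]
  by_cases hcA : (aloop K (heapify scoville) 0).1.getLastD 0 < K
  · rw [if_pos hcA, if_pos (hiff.mp hcA)]
  · rw [if_neg hcA, if_neg (fun hc => hcA (hiff.mpr hc)), ea]
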